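-- pv_equiv track=rewrite | github.com/MaEgV/python_exam | exam.py | split_graph
-- ===== SOURCE A (Python) =====
-- def split_graph(graph):
--     visited = set()
--     curr_component = set()
--     components = []
--     bridges = []
--
--     def dfs(node):
--         if node in visited:
--             return
--
--         visited.add(node)
--         curr_component.add(node)
--
--         for neighbor in graph[node]:
--             if graph[node][neighbor] == 1:
--                 bridges.append((node, neighbor))
--             else:
--                 dfs(neighbor)
--
--     for start_node in graph:
--         curr_component = set()
--         dfs(start_node)
--         if curr_component:
--             components.append(curr_component)
--
--     return components, bridges
-- ===== SOURCE B (Python) =====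
-- def split_graph(graph):
--     visited = set()
--     components = []
--     bridges = []
--
--     for start in graph:
--         curr = set()
--         if start not in visited:
--             visited.add(start)
--             curr.add(start)
--             stack = [(start, iter(graph[start].items()))]
--             while stack:
--                 node, it = stack[-1]
--                 entry = next(it, None)
--                 if entry is None:
--                     stack.pop()
--                     continue
--                 nbr, w = entry
--                 if w == 1:
--                     bridges.append((node, nbr))
--                 elif nbr not in visited:
--                     visited.add(nbr)
--                     curr.add(nbr)
--                     stack.append((nbr, iter(graph[nbr].items())))
--         if curr:
--             components.append(curr)
--     return components, bridges
-- ===== Notes on version B (the rewrite author's own statement) =====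
-- stated objective: alternative
-- what changed: A's recursive dfs (with a closure mutating visited/curr_component/bridges) is replaced by an iterative depth-first traversal over an explicit stack of (node, neighbour-iterator) frames inside a single loop, reproducing A's exact component and bridge order without recursion.
import Mathlib
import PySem

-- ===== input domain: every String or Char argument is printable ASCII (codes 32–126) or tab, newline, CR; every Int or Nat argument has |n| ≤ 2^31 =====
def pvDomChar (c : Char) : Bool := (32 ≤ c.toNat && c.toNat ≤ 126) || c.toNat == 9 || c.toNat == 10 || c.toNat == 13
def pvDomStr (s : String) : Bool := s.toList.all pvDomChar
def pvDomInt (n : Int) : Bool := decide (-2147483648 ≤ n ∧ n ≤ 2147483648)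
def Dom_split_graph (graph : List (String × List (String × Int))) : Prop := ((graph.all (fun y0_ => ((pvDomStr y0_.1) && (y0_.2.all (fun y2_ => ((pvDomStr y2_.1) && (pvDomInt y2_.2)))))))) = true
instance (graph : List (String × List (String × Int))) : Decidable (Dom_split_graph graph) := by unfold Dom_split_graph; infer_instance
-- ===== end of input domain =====

-- B replaces A's recursive DFS by an iterative DFS over an explicit stack of
-- (node, remaining-neighbours) frames (objective: alternative decomposition, same cost).

-- shared input conversion: the Python harness hands both programs the same dict-of-dicts
def pvMkGraph (graph : List (String × List (String × Int))) : PySem.Dict String (PySem.Dict String Int) :=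
  PySem.Dict.ofList (graph.map (fun p => (p.1, PySem.Dict.ofList p.2)))

-- all node names mentioned anywhere (keys and neighbours); its size bounds how many
-- distinct nodes can ever be marked visited, hence bounds both ports' fuel
def pvAllNodes (g : PySem.Dict String (PySem.Dict String Int)) : PySem.Set String :=
  PySem.Set.ofList (g.keys ++ g.items.flatMap (fun p => p.2.keys))

structure PvSt where
  visited : PySem.Set String
  curr : PySem.Set String
  bridges : List (String × String)

-- ===== PORT A =====
mutual
-- A's recursive dfs; fuel only guards totality (each consumption marks a new node,
-- so fuel (pvAllNodes g).length + 1 is never exhausted)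
def pvDfsA (g : PySem.Dict String (PySem.Dict String Int)) (fuel : Nat) (node : String) (st : PvSt) : PvSt :=
  if PySem.Set.contains st.visited node then st
  else match fuel with
    | 0 => st
    | f + 1 =>
      let st1 : PvSt := ⟨PySem.Set.add st.visited node, PySem.Set.add st.curr node, st.bridges⟩
      match g.get? node with
      | none => st1            -- Python raises KeyError here; excluded by Pre_
      | some adj => pvGoA g f node adj.items st1
  termination_by (fuel, 0)

-- the 'for neighbor in graph[node]' loop of A's dfs
def pvGoA (g : PySem.Dict String (PySem.Dict String Int)) (f : Nat) (node : String) (items : List (String × Int)) (st : PvSt) : PvSt :=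
  match items with
  | [] => st
  | (nbr, w) :: rest =>
    if w == 1 then pvGoA g f node rest ⟨st.visited, st.curr, st.bridges ++ [(node, nbr)]⟩
    else pvGoA g f node rest (pvDfsA g f nbr st)
  termination_by (f, items.length + 1)
end

def split_graph (graph : List (String × List (String × Int))) : List (List String) × (List (String × String)) :=
  let g := pvMkGraph graph
  let fuel := (pvAllNodes g).length + 1
  let r := g.keys.foldl (fun (acc : List (List String) × PvSt) k =>
      let st0 : PvSt := ⟨acc.2.visited, PySem.Set.empty, acc.2.bridges⟩
      let st1 := pvDfsA g fuel k st0
      (if st1.curr.isEmpty then acc.1 else acc.1 ++ [st1.curr], st1))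
    ([], ⟨PySem.Set.empty, PySem.Set.empty, []⟩)
  (r.1, r.2.bridges)

-- ===== PORT B =====
-- graph[node].items() for the frame pushed for node
def pvAdj (g : PySem.Dict String (PySem.Dict String Int)) (node : String) : List (String × Int) :=
  match g.get? node with
  | none => []                 -- Python raises KeyError here; excluded by Pre_
  | some adj => adj.items

def pvWeight (stack : List (String × List (String × Int))) : Nat :=
  (stack.map (fun fr => fr.2.length + 1)).sum

-- B's while loop: explicit stack of (node, remaining neighbour items) frames;
-- fuel only guards totality and is consumed exactly when a new node is pushed
def pvRunB (g : PySem.Dict String (PySem.Dict String Int)) (fuel : Nat) (stack : List (String × List (String × Int))) (st : PvSt) : PvSt :=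
  match stack with
  | [] => st
  | (node, items) :: rest =>
    match items with
    | [] => pvRunB g fuel rest st
    | (nbr, w) :: more =>
      if w == 1 then
        pvRunB g fuel ((node, more) :: rest) ⟨st.visited, st.curr, st.bridges ++ [(node, nbr)]⟩
      else if PySem.Set.contains st.visited nbr then
        pvRunB g fuel ((node, more) :: rest) st
      else match fuel with
        | 0 => st
        | f + 1 =>
          pvRunB g f ((nbr, pvAdj g nbr) :: (node, more) :: rest)
            ⟨PySem.Set.add st.visited nbr, PySem.Set.add st.curr nbr, st.bridges⟩
  termination_by (fuel, pvWeight stack)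
  decreasing_by all_goals (simp [pvWeight]; omega)

def split_graph_alt (graph : List (String × List (String × Int))) : List (List String) × (List (String × String)) :=
  let g := pvMkGraph graph
  let fuel := (pvAllNodes g).length + 1
  let r := g.keys.foldl (fun (acc : List (List String) × PvSt) k =>
      let st := acc.2
      let st1 :=
        if PySem.Set.contains st.visited k then ⟨st.visited, PySem.Set.empty, st.bridges⟩
        else pvRunB g fuel [(k, pvAdj g k)]
               ⟨PySem.Set.add st.visited k, PySem.Set.add PySem.Set.empty k, st.bridges⟩
      (if st1.curr.isEmpty then acc.1 else acc.1 ++ [st1.curr], st1))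
    ([], ⟨PySem.Set.empty, PySem.Set.empty, []⟩)
  (r.1, r.2.bridges)

-- ===== PRECONDITION & SPEC =====
-- Pre_ excludes exactly the inputs where the Python A raises KeyError:
-- some neighbour with weight ≠ 1 is not a key of the graph (dfs then does graph[nbr]).
def Pre_split_graph (graph : List (String × List (String × Int))) : Prop :=
  ∀ p ∈ (pvMkGraph graph).items, ∀ q ∈ p.2.items, q.2 ≠ 1 → q.1 ∈ (pvMkGraph graph).keys
instance (graph : List (String × List (String × Int))) : Decidable (Pre_split_graph graph) := by
  unfold Pre_split_graph; infer_instance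

def pvWitness_split_graph : (List (String × List (String × Int))) := [("a", [("b", 1), ("a", 2)])]

def Spec_split_graph (graph : List (String × List (String × Int))) (out : List (List String) × (List (String × String))) : Prop := out = split_graph_alt graph
instance (graph : List (String × List (String × Int))) (out : List (List String) × (List (String × String))) : Decidable (Spec_split_graph graph out) := by unfold Spec_split_graph; infer_instance

-- ===== CLAIM (what is proved, stated in full; the proofs are below) =====
def Claim_equal_split_graph : Prop := ∀ (graph : List (String × List (String × Int))), Dom_split_graph graph → Pre_split_graph graph → Spec_split_graph graph (split_graph graph)

-- ===== LEMMAS AND PROOFS =====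

-- proof-side helpers -------------------------------------------------------

-- number of not-yet-visited node names; the measure both fuels dominate
def pvBound (g : PySem.Dict String (PySem.Dict String Int)) (v : PySem.Set String) : Nat :=
  ((pvAllNodes g).filter (fun x => decide (x ∉ v))).length

def pvItemsOK (g : PySem.Dict String (PySem.Dict String Int)) (items : List (String × Int)) : Prop :=
  ∀ p ∈ items, p.1 ∈ pvAllNodes g

def pvStackOK (g : PySem.Dict String (PySem.Dict String Int)) (stack : List (String × List (String × Int))) : Prop :=
  ∀ fr ∈ stack, pvItemsOK g fr.2

-- one-step equations -------------------------------------------------------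

theorem pvDfsA_visited (g : PySem.Dict String (PySem.Dict String Int)) (fuel : Nat) (node : String) (st : PvSt)
    (h : PySem.Set.contains st.visited node = true) : pvDfsA g fuel node st = st := by
  have hm : node ∈ st.visited := (PySem.Set.contains_iff st.visited node).1 h
  rw [pvDfsA.eq_def]; simp [hm]

theorem pvDfsA_step (g : PySem.Dict String (PySem.Dict String Int)) (f : Nat) (node : String) (st : PvSt)
    (h : PySem.Set.contains st.visited node = false) :
    pvDfsA g (f + 1) node st
      = pvGoA g f node (pvAdj g node) ⟨PySem.Set.add st.visited node, PySem.Set.add st.curr node, st.bridges⟩ := by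
  rw [pvDfsA]; simp only [h]
  cases hg : g.get? node with
  | none => simp [pvAdj, hg, pvGoA]
  | some adj => simp [pvAdj, hg]

theorem pvGoA_nil (g : PySem.Dict String (PySem.Dict String Int)) (f : Nat) (node : String) (st : PvSt) :
    pvGoA g f node [] st = st := by rw [pvGoA]

theorem pvGoA_bridge (g : PySem.Dict String (PySem.Dict String Int)) (f : Nat) (node nbr : String) (w : Int)
    (rest : List (String × Int)) (st : PvSt) (h : (w == 1) = true) :
    pvGoA g f node ((nbr, w) :: rest) st = pvGoA g f node rest ⟨st.visited, st.curr, st.bridges ++ [(node, nbr)]⟩ := by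
  rw [pvGoA]; simp [h]

theorem pvGoA_rec (g : PySem.Dict String (PySem.Dict String Int)) (f : Nat) (node nbr : String) (w : Int)
    (rest : List (String × Int)) (st : PvSt) (h : (w == 1) = false) :
    pvGoA g f node ((nbr, w) :: rest) st = pvGoA g f node rest (pvDfsA g f nbr st) := by
  rw [pvGoA]; simp [h]

theorem pvRunB_nil (g : PySem.Dict String (PySem.Dict String Int)) (fuel : Nat) (st : PvSt) :
    pvRunB g fuel [] st = st := by rw [pvRunB.eq_def]

theorem pvRunB_pop (g : PySem.Dict String (PySem.Dict String Int)) (fuel : Nat) (node : String)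
    (rest : List (String × List (String × Int))) (st : PvSt) :
    pvRunB g fuel ((node, []) :: rest) st = pvRunB g fuel rest st := by rw [pvRunB.eq_def]

theorem pvRunB_bridge (g : PySem.Dict String (PySem.Dict String Int)) (fuel : Nat) (node nbr : String) (w : Int)
    (more : List (String × Int)) (rest : List (String × List (String × Int))) (st : PvSt) (h : (w == 1) = true) :
    pvRunB g fuel ((node, (nbr, w) :: more) :: rest) st
      = pvRunB g fuel ((node, more) :: rest) ⟨st.visited, st.curr, st.bridges ++ [(node, nbr)]⟩ := by
  rw [pvRunB.eq_def]; simp only [h, if_true]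

theorem pvRunB_skip (g : PySem.Dict String (PySem.Dict String Int)) (fuel : Nat) (node nbr : String) (w : Int)
    (more : List (String × Int)) (rest : List (String × List (String × Int))) (st : PvSt)
    (h : (w == 1) = false) (hv : PySem.Set.contains st.visited nbr = true) :
    pvRunB g fuel ((node, (nbr, w) :: more) :: rest) st = pvRunB g fuel ((node, more) :: rest) st := by
  rw [pvRunB.eq_def]; simp only [h, hv, if_true, if_false, Bool.false_eq_true]

theorem pvRunB_push (g : PySem.Dict String (PySem.Dict String Int)) (f : Nat) (node nbr : String) (w : Int)
    (more : List (String × Int)) (rest : List (String × List (String × Int))) (st : PvSt)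
    (h : (w == 1) = false) (hv : PySem.Set.contains st.visited nbr = false) :
    pvRunB g (f + 1) ((node, (nbr, w) :: more) :: rest) st
      = pvRunB g f ((nbr, pvAdj g nbr) :: (node, more) :: rest)
          ⟨PySem.Set.add st.visited nbr, PySem.Set.add st.curr nbr, st.bridges⟩ := by
  rw [pvRunB.eq_def]; simp only [h, hv, if_false, Bool.false_eq_true]

-- bound / membership facts -------------------------------------------------

theorem pvContains_false (v : PySem.Set String) (x : String) (h : PySem.Set.contains v x = false) :
    x ∉ v := by
  intro hm; rw [(PySem.Set.contains_iff v x).2 hm] at h; cases h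

theorem pvDfsA_zero (g : PySem.Dict String (PySem.Dict String Int)) (node : String) (st : PvSt) :
    pvDfsA g 0 node st = st := by
  rw [pvDfsA.eq_def]; split <;> rfl

theorem pvBound_le (g : PySem.Dict String (PySem.Dict String Int)) (v : PySem.Set String) :
    pvBound g v ≤ (pvAllNodes g).length := List.length_filter_le _ _

theorem pvFilter_mono (l : List String) (p q : String → Bool) (h : ∀ a, p a = true → q a = true) :
    (l.filter p).length ≤ (l.filter q).length := by
  induction l with
  | nil => simp
  | cons a t ih =>
    simp only [List.filter_cons]
    cases hp : p a with
    | true => rw [h a hp]; simpa using ih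
    | false =>
      cases hq : q a with
      | true => simpa using Nat.le_trans ih (Nat.le_succ _)
      | false => simpa using ih

theorem pvFilter_add_lt (v : PySem.Set String) (x : String) (hv : x ∉ v) :
    ∀ l : List String, l.Nodup → x ∈ l →
    (l.filter (fun y => decide (y ∉ PySem.Set.add v x))).length
      < (l.filter (fun y => decide (y ∉ v))).length := by
  intro l
  induction l with
  | nil => intro _ hx; cases hx
  | cons a t ih =>
    intro hnd hx
    have hnd' := List.nodup_cons.1 hnd
    simp only [List.filter_cons]
    by_cases hax : a = x
    · subst hax
      have h1 : (decide (a ∉ PySem.Set.add v a)) = false := by simp [PySem.Set.mem_add]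
      have h2 : (decide (a ∉ v)) = true := by simp [hv]
      rw [h1, h2]
      have hfe : t.filter (fun y => decide (y ∉ PySem.Set.add v a)) = t.filter (fun y => decide (y ∉ v)) := by
        apply List.filter_congr
        intro y hy
        have hyx : y ≠ a := fun he => hnd'.1 (he ▸ hy)
        simp [PySem.Set.mem_add, hyx]
      rw [hfe]
      simp
    · have hxt : x ∈ t := by
        cases hx with
        | head => exact absurd rfl hax
        | tail _ hm => exact hm
      have hpred : (decide (a ∉ PySem.Set.add v x)) = (decide (a ∉ v)) := by
        simp [PySem.Set.mem_add, hax]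
      rw [hpred]
      cases hd : decide (a ∉ v) with
      | true => simpa using Nat.succ_lt_succ (ih hnd'.2 hxt)
      | false => simpa using ih hnd'.2 hxt

theorem pvBound_mono (g : PySem.Dict String (PySem.Dict String Int)) (v v' : PySem.Set String)
    (h : ∀ y, y ∈ v → y ∈ v') : pvBound g v' ≤ pvBound g v := by
  apply pvFilter_mono
  intro a ha
  simp only [decide_eq_true_eq] at ha ⊢
  exact fun hm => ha (h a hm)

theorem pvBound_add_lt (g : PySem.Dict String (PySem.Dict String Int)) (v : PySem.Set String) (x : String)
    (hx : x ∈ pvAllNodes g) (hv : x ∉ v) : pvBound g (PySem.Set.add v x) < pvBound g v :=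
  pvFilter_add_lt v x hv (pvAllNodes g) (PySem.Set.nodup_ofList _) hx

theorem pvAdjOK (g : PySem.Dict String (PySem.Dict String Int)) (node : String) :
    pvItemsOK g (pvAdj g node) := by
  intro p hp
  unfold pvAdj at hp
  cases hg : g.get? node with
  | none => rw [hg] at hp; cases hp
  | some adj =>
    rw [hg] at hp
    unfold pvAllNodes
    rw [PySem.Set.mem_ofList]
    apply List.mem_append_right
    apply List.mem_flatMap.2
    exact ⟨(node, adj), by exact PySem.Dict.mem_items_of_get?_eq_some _ hg, List.mem_map.2 ⟨p, hp, rfl⟩⟩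

-- A's dfs only grows visited
theorem pvMono (g : PySem.Dict String (PySem.Dict String Int)) : ∀ fuel : Nat,
    (∀ node st, ∀ x ∈ st.visited, x ∈ (pvDfsA g fuel node st).visited) ∧
    (∀ node items st, ∀ x ∈ st.visited, x ∈ (pvGoA g fuel node items st).visited) := by
  intro fuel
  induction fuel with
  | zero =>
    refine ⟨fun node st x hx => by rw [pvDfsA_zero]; exact hx, ?_⟩
    intro node items
    induction items with
    | nil => intro st x hx; rw [pvGoA_nil]; exact hx
    | cons p rest ih =>
      intro st x hx
      obtain ⟨nbr, w⟩ := p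
      cases hw : (w == 1) with
      | true => rw [pvGoA_bridge _ _ _ _ _ _ _ hw]; exact ih _ _ hx
      | false =>
        rw [pvGoA_rec _ _ _ _ _ _ _ hw]
        apply ih
        rw [pvDfsA_zero]; exact hx
  | succ f ihf =>
    have m1 : ∀ node st, ∀ x ∈ st.visited, x ∈ (pvDfsA g (f + 1) node st).visited := by
      intro node st x hx
      cases h : PySem.Set.contains st.visited node with
      | true => rw [pvDfsA_visited _ _ _ _ h]; exact hx
      | false =>
        rw [pvDfsA_step _ _ _ _ h]
        exact ihf.2 _ _ _ x ((PySem.Set.mem_add _ _ _).2 (Or.inl hx))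
    refine ⟨m1, ?_⟩
    intro node items
    induction items with
    | nil => intro st x hx; rw [pvGoA_nil]; exact hx
    | cons p rest ih =>
      intro st x hx
      obtain ⟨nbr, w⟩ := p
      cases hw : (w == 1) with
      | true => rw [pvGoA_bridge _ _ _ _ _ _ _ hw]; exact ih _ _ hx
      | false =>
        rw [pvGoA_rec _ _ _ _ _ _ _ hw]
        exact ih _ _ (m1 _ _ _ hx)

-- with enough fuel (≥ pvBound), pvRunB does not depend on the fuel
theorem pvMo (g : PySem.Dict String (PySem.Dict String Int)) : ∀ b w : Nat,
    ∀ (stack : List (String × List (String × Int))) (st : PvSt) (f f' : Nat),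
    pvBound g st.visited ≤ b → pvWeight stack ≤ w →
    pvBound g st.visited ≤ f → pvBound g st.visited ≤ f' → pvStackOK g stack →
    pvRunB g f stack st = pvRunB g f' stack st := by
  intro b
  induction b using Nat.strong_induction_on with
  | _ b ihb =>
  intro w
  induction w using Nat.strong_induction_on with
  | _ w ihw =>
  intro stack st f f' hb hw hf hf' hok
  match stack with
  | [] => rw [pvRunB_nil, pvRunB_nil]
  | (node, []) :: rest =>
    rw [pvRunB_pop, pvRunB_pop]
    have hw1 : 1 ≤ pvWeight ((node, ([] : List (String × Int))) :: rest) := by simp [pvWeight]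
    refine ihw (w - 1) (by omega) rest st f f' hb ?_ hf hf' (fun fr hfr => hok fr (List.mem_cons_of_mem _ hfr))
    simp only [pvWeight, List.map_cons, List.sum_cons] at hw ⊢
    omega
  | (node, (nbr, wt) :: more) :: rest =>
    have hokm : pvStackOK g ((node, more) :: rest) := by
      intro fr hfr
      cases hfr with
      | head => exact fun p hp => hok (node, (nbr, wt) :: more) List.mem_cons_self p (List.mem_cons_of_mem _ hp)
      | tail _ hm => exact hok fr (List.mem_cons_of_mem _ hm)
    have hwle : pvWeight ((node, more) :: rest) ≤ w - 1 := by
      simp only [pvWeight, List.map_cons, List.sum_cons, List.length_cons] at hw ⊢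
      omega
    have hwlt : (w - 1) < w := by
      have : 1 ≤ pvWeight ((node, (nbr, wt) :: more) :: rest) := by simp [pvWeight]; omega
      omega
    cases hwt : (wt == 1) with
    | true =>
      rw [pvRunB_bridge _ _ _ _ _ _ _ _ hwt, pvRunB_bridge _ _ _ _ _ _ _ _ hwt]
      exact ihw (w - 1) hwlt _ _ f f' hb hwle hf hf' hokm
    | false =>
      cases hv : PySem.Set.contains st.visited nbr with
      | true =>
        rw [pvRunB_skip _ _ _ _ _ _ _ _ hwt hv, pvRunB_skip _ _ _ _ _ _ _ _ hwt hv]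
        exact ihw (w - 1) hwlt _ _ f f' hb hwle hf hf' hokm
      | false =>
        have hnbr : nbr ∈ pvAllNodes g :=
          hok (node, (nbr, wt) :: more) List.mem_cons_self (nbr, wt) List.mem_cons_self
        have hnv : nbr ∉ st.visited := pvContains_false _ _ hv
        have hlt := pvBound_add_lt g st.visited nbr hnbr hnv
        obtain ⟨f0, rfl⟩ : ∃ f0, f = f0 + 1 := ⟨f - 1, by omega⟩
        obtain ⟨f0', rfl⟩ : ∃ f0', f' = f0' + 1 := ⟨f' - 1, by omega⟩
        rw [pvRunB_push _ _ _ _ _ _ _ _ hwt hv, pvRunB_push _ _ _ _ _ _ _ _ hwt hv]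
        have hok' : pvStackOK g ((nbr, pvAdj g nbr) :: (node, more) :: rest) := by
          intro fr hfr
          cases hfr with
          | head => exact pvAdjOK g nbr
          | tail _ hm => exact hokm fr hm
        exact ihb (b - 1) (by omega) (pvWeight ((nbr, pvAdj g nbr) :: (node, more) :: rest)) _
          ⟨PySem.Set.add st.visited nbr, PySem.Set.add st.curr nbr, st.bridges⟩ f0 f0'
          (by dsimp only; omega) (Nat.le_refl _) (by dsimp only; omega) (by dsimp only; omega) hok'

-- main simulation: B's stack machine processes one frame exactly as A's dfs loop does
theorem pvL (g : PySem.Dict String (PySem.Dict String Int)) : ∀ b : Nat,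
    ∀ (items : List (String × Int)) (node : String) (rest : List (String × List (String × Int)))
      (st : PvSt) (fA f : Nat),
    pvBound g st.visited ≤ b →
    pvBound g st.visited ≤ fA → pvBound g st.visited ≤ f →
    pvItemsOK g items → pvStackOK g rest →
    pvRunB g f ((node, items) :: rest) st = pvRunB g f rest (pvGoA g fA node items st) := by
  intro b
  induction b using Nat.strong_induction_on with
  | _ b ihb =>
  intro items node rest
  induction items with
  | nil =>
    intro st fA f _ _ _ _ _
    rw [pvGoA_nil, pvRunB_pop]
  | cons p more ih =>
    intro st fA f hb hfA hf hitems hok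
    obtain ⟨nbr, wt⟩ := p
    have hmore : pvItemsOK g more := fun q hq => hitems q (List.mem_cons_of_mem _ hq)
    cases hwt : (wt == 1) with
    | true =>
      rw [pvRunB_bridge _ _ _ _ _ _ _ _ hwt, pvGoA_bridge _ _ _ _ _ _ _ hwt]
      exact ih _ fA f hb hfA hf hmore hok
    | false =>
      rw [pvGoA_rec _ _ _ _ _ _ _ hwt]
      cases hv : PySem.Set.contains st.visited nbr with
      | true =>
        rw [pvRunB_skip _ _ _ _ _ _ _ _ hwt hv, pvDfsA_visited _ _ _ _ hv]
        exact ih _ fA f hb hfA hf hmore hok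
      | false =>
        have hnbr : nbr ∈ pvAllNodes g := hitems (nbr, wt) List.mem_cons_self
        have hnv : nbr ∉ st.visited := pvContains_false _ _ hv
        have hlt := pvBound_add_lt g st.visited nbr hnbr hnv
        obtain ⟨f0, rfl⟩ : ∃ f0, f = f0 + 1 := ⟨f - 1, by omega⟩
        obtain ⟨fA0, rfl⟩ : ∃ fA0, fA = fA0 + 1 := ⟨fA - 1, by omega⟩
        rw [pvRunB_push _ _ _ _ _ _ _ _ hwt hv, pvDfsA_step _ _ _ _ hv]
        have hok2 : pvStackOK g ((node, more) :: rest) := by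
          intro fr hfr
          cases hfr with
          | head => exact hmore
          | tail _ hm => exact hok fr hm
        have e1 := ihb (b - 1) (by omega) (pvAdj g nbr) nbr ((node, more) :: rest)
          ⟨PySem.Set.add st.visited nbr, PySem.Set.add st.curr nbr, st.bridges⟩ fA0 f0
          (by dsimp only; omega) (by dsimp only; omega) (by dsimp only; omega) (pvAdjOK g nbr) hok2
        rw [e1]
        have hsub : ∀ x ∈ (PySem.Set.add st.visited nbr),
            x ∈ (pvGoA g fA0 nbr (pvAdj g nbr)
              ⟨PySem.Set.add st.visited nbr, PySem.Set.add st.curr nbr, st.bridges⟩).visited :=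
          (pvMono g fA0).2 nbr (pvAdj g nbr) ⟨PySem.Set.add st.visited nbr, PySem.Set.add st.curr nbr, st.bridges⟩
        have hb2 : pvBound g (pvGoA g fA0 nbr (pvAdj g nbr)
              ⟨PySem.Set.add st.visited nbr, PySem.Set.add st.curr nbr, st.bridges⟩).visited
            ≤ pvBound g (PySem.Set.add st.visited nbr) := pvBound_mono g _ _ hsub
        have e2 := ihb (b - 1) (by omega) more node rest
          (pvGoA g fA0 nbr (pvAdj g nbr)
            ⟨PySem.Set.add st.visited nbr, PySem.Set.add st.curr nbr, st.bridges⟩) (fA0 + 1) f0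
          (by omega) (by omega) (by omega) hmore hok
        rw [e2]
        -- mono of the A-side continuation, to realign the fuels with pvMo
        have hsub2 : ∀ x ∈ (pvGoA g fA0 nbr (pvAdj g nbr)
              ⟨PySem.Set.add st.visited nbr, PySem.Set.add st.curr nbr, st.bridges⟩).visited,
            x ∈ (pvGoA g (fA0 + 1) node more (pvGoA g fA0 nbr (pvAdj g nbr)
              ⟨PySem.Set.add st.visited nbr, PySem.Set.add st.curr nbr, st.bridges⟩)).visited :=
          (pvMono g (fA0 + 1)).2 node more (pvGoA g fA0 nbr (pvAdj g nbr) ⟨PySem.Set.add st.visited nbr, PySem.Set.add st.curr nbr, st.bridges⟩)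
        have hb3 := pvBound_mono g _ _ hsub2
        exact pvMo g (pvBound g (pvGoA g (fA0 + 1) node more (pvGoA g fA0 nbr (pvAdj g nbr)
              ⟨PySem.Set.add st.visited nbr, PySem.Set.add st.curr nbr, st.bridges⟩)).visited)
          (pvWeight rest) rest _ f0 (f0 + 1) (Nat.le_refl _) (Nat.le_refl _) (by omega) (by omega) hok

theorem pvFold (g : PySem.Dict String (PySem.Dict String Int)) : ∀ (ks : List String) (acc : List (List String) × PvSt),
    List.foldl (fun (acc : List (List String) × PvSt) k =>
      let st0 : PvSt := ⟨acc.2.visited, PySem.Set.empty, acc.2.bridges⟩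
      let st1 := pvDfsA g ((pvAllNodes g).length + 1) k st0
      (if st1.curr.isEmpty then acc.1 else acc.1 ++ [st1.curr], st1)) acc ks
    = List.foldl (fun (acc : List (List String) × PvSt) k =>
      let st := acc.2
      let st1 :=
        if PySem.Set.contains st.visited k then (⟨st.visited, PySem.Set.empty, st.bridges⟩ : PvSt)
        else pvRunB g ((pvAllNodes g).length + 1) [(k, pvAdj g k)]
               ⟨PySem.Set.add st.visited k, PySem.Set.add PySem.Set.empty k, st.bridges⟩
      (if st1.curr.isEmpty then acc.1 else acc.1 ++ [st1.curr], st1)) acc ks := by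
  intro ks
  induction ks with
  | nil => intro acc; rfl
  | cons k ks ih =>
    intro acc
    have hstate : pvDfsA g ((pvAllNodes g).length + 1) k ⟨acc.2.visited, PySem.Set.empty, acc.2.bridges⟩
        = (if PySem.Set.contains acc.2.visited k then (⟨acc.2.visited, PySem.Set.empty, acc.2.bridges⟩ : PvSt)
           else pvRunB g ((pvAllNodes g).length + 1) [(k, pvAdj g k)]
             ⟨PySem.Set.add acc.2.visited k, PySem.Set.add PySem.Set.empty k, acc.2.bridges⟩) := by
      cases hv : PySem.Set.contains acc.2.visited k with
      | true =>
        rw [pvDfsA_visited _ _ _ _ (show PySem.Set.contains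
          (⟨acc.2.visited, PySem.Set.empty, acc.2.bridges⟩ : PvSt).visited k = true from hv)]
        simp
      | false =>
        rw [pvDfsA_step _ _ _ _ (show PySem.Set.contains
          (⟨acc.2.visited, PySem.Set.empty, acc.2.bridges⟩ : PvSt).visited k = false from hv)]
        simp only [Bool.false_eq_true, if_false]
        have hl := pvL g (pvBound g (PySem.Set.add acc.2.visited k))
          (pvAdj g k) k [] ⟨PySem.Set.add acc.2.visited k, PySem.Set.add PySem.Set.empty k, acc.2.bridges⟩
          ((pvAllNodes g).length) ((pvAllNodes g).length + 1)
          (by dsimp only; exact Nat.le_refl _)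
          (by dsimp only; exact pvBound_le g _)
          (by dsimp only; exact Nat.le_trans (pvBound_le g _) (Nat.le_succ _))
          (pvAdjOK g k) (fun fr hfr => absurd hfr (List.not_mem_nil))
        rw [hl, pvRunB_nil]
    rw [List.foldl_cons, List.foldl_cons]
    dsimp only
    rw [hstate]
    exact ih _

-- ===== VERDICT =====
theorem split_graph_spec : Claim_equal_split_graph := by
  intro graph _ _
  unfold Spec_split_graph split_graph split_graph_alt
  dsimp only
  rw [pvFold]
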